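-- pv_equiv track=rewrite | github.com/AlexBubb/ChatProgram | wordstonum.py | stringToNum
-- ===== SOURCE A (Python) =====
-- def stringToNum(message):
--   grd = 1
--   num = 0
--   message = message[::-1]
--   for i in range(0, len(message), +1):
--     num = num + ord(message[i]) * grd
--     grd *= 256
--   return num
-- ===== SOURCE B (Python) =====
-- def stringToNum(message):
--   num = 0
--   for c in message:
--     num = num * 256 + ord(c)
--   return num
-- ===== Notes on version B (the rewrite author's own statement) =====
-- stated objective: idiomatic
-- what changed: Horner's method: forward pass with a single multiply-accumulate (num = num*256 + ord(c)), dropping A's string reversal and the separate power-of-256 accumulator whose growing big-int multiplications A pays for.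
import Mathlib
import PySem

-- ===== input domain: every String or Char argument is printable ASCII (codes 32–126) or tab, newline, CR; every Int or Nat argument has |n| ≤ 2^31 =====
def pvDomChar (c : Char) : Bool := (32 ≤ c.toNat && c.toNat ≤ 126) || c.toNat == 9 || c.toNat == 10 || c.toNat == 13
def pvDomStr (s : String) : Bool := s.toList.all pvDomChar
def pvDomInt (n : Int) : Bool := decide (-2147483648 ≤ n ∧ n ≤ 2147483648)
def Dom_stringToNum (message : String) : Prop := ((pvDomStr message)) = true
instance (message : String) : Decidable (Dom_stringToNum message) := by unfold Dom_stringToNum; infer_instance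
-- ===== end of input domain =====

-- B replaces A's reverse-the-string-and-track-a-power loop by a forward Horner pass
-- (num = num*256 + ord(c)) with a single accumulator; same O(n) cost, more idiomatic.

-- ===== PORT A =====
def stringToNum (message : String) : Int :=
  -- message = message[::-1]
  let rev : List Char := (PySem.List.slice? message.toList none none (-1)).getD []
  -- for i in range(0, len(message), 1): num = num + ord(message[i]) * grd; grd *= 256
  ((PySem.List.pyRange 0 (rev.length : Int) 1).foldl
    (fun (st : Int × Int) i =>
      (st.1 + ((PySem.List.pyGetD rev i 'a').toNat : Int) * st.2, st.2 * 256))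
    ((0 : Int), (1 : Int))).1

-- ===== PORT B =====
def stringToNum_alt (message : String) : Int :=
  message.toList.foldl (fun num c => num * 256 + (c.toNat : Int)) 0

-- ===== PRECONDITION & SPEC =====
def Spec_stringToNum (message : String) (out : Int) : Prop := out = stringToNum_alt message
instance (message : String) (out : Int) : Decidable (Spec_stringToNum message out) := by unfold Spec_stringToNum; infer_instance

-- ===== CLAIM (what is proved, stated in full; the proofs are below) =====
def Claim_equal_stringToNum : Prop := ∀ (message : String), Dom_stringToNum message → Spec_stringToNum message (stringToNum message)

-- ===== LEMMAS AND PROOFS =====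

-- A's loop on a list l with state (num, grd) yields num + grd * Horner(l.reverse).
theorem pv_loop_eq (l : List Char) (num grd : Int) :
    (l.foldl (fun (st : Int × Int) c => (st.1 + (c.toNat : Int) * st.2, st.2 * 256)) (num, grd)).1
      = num + grd * (l.reverse.foldl (fun n c => n * 256 + (c.toNat : Int)) 0) := by
  induction l generalizing num grd with
  | nil => simp
  | cons c cs ih =>
      simp only [List.reverse_cons, List.foldl_append, List.foldl]
      rw [ih]
      ring

-- ===== VERDICT (by name: the statement is the Claim_ definition above) =====
theorem stringToNum_spec : Claim_equal_stringToNum := by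
  intro message _
  unfold Spec_stringToNum stringToNum stringToNum_alt
  rw [PySem.List.slice?_none_none_neg_one]
  simp only [Option.getD_some]
  rw [PySem.List.foldl_pyRange_zero_pyGetD' message.toList.reverse 'a'
        (fun (st : Int × Int) c => (st.1 + (c.toNat : Int) * st.2, st.2 * 256)) ((0:Int),(1:Int))]
  rw [pv_loop_eq]
  simp
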